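-- pv_equiv track=rewrite | github.com/BenPalmer1983/qeconverge | examples/example3/qeconverge.py | get_dir
-- ===== SOURCE A (Python) =====
-- def get_dir(file_path):
--   directory = ''
--   read = False
--   for i in range(len(file_path)):
--     if(read):
--       directory = file_path[-1-i] + directory
--     if(file_path[-1-i] == "/"):
--       read = True
--   return directory
-- ===== SOURCE B (Python) =====
-- def get_dir(file_path):
--   return '/'.join(file_path.split('/')[:-1])
-- ===== Notes on version B (the rewrite author's own statement) =====
-- stated objective: faster
-- what changed: A scans the string character by character from the right with a seen-slash flag, prepending one character at a time (quadratic string building); B tokenizes the path on the delimiter, drops the final segment and rejoins the rest in one pass.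
import Mathlib
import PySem

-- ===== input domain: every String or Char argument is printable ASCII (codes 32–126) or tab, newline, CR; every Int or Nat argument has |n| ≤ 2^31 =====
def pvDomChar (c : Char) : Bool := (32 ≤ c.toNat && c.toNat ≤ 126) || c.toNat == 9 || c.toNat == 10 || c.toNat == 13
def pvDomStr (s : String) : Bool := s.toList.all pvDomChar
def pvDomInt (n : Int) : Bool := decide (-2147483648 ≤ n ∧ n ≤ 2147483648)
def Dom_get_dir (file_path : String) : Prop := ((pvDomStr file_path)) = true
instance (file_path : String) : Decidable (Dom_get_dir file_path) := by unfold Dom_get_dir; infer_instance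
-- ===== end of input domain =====

-- B replaces A's reversed character scan (prepending one char at a time) by an idiomatic
-- split('/')[:-1] join; equivalence of return values is proved for all strings.

-- ===== PORT A =====
-- literal transliteration of A: scan i = 0..len-1, index file_path[-1-i] (always in range),
-- state (directory, read); branches in A's order.
def get_dir (file_path : String) : String :=
  let cs := file_path.toList
  let res := (PySem.List.pyRange 0 (PySem.Str.len file_path) 1).foldl
    (fun (st : List Char × Bool) i =>
      let st1 := if st.2 then ((PySem.List.pyGetD cs (-1 - i) ' ') :: st.1, st.2) else st
      if PySem.List.pyGetD cs (-1 - i) ' ' = '/' then (st1.1, true) else st1)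
    ([], false)
  String.ofList res.1

-- ===== PORT B =====
-- literal transliteration of B: '/'.join(file_path.split('/')[:-1])
def get_dir_alt (file_path : String) : String :=
  String.ofList (PySem.Chars.join ['/']
    (PySem.List.slice (PySem.Chars.splitOn file_path.toList ['/']) none (some (-1))))

-- ===== PRECONDITION & SPEC =====
def Spec_get_dir (file_path : String) (out : String) : Prop := out = get_dir_alt file_path
instance (file_path : String) (out : String) : Decidable (Spec_get_dir file_path out) := by unfold Spec_get_dir; infer_instance

-- ===== CLAIM (what is proved, stated in full; the proofs are below) =====
def Claim_equal_get_dir : Prop := ∀ (file_path : String), Dom_get_dir file_path → Spec_get_dir file_path (get_dir file_path)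

-- ===== LEMMAS AND PROOFS =====

-- the common characterization: everything strictly before the last '/' (or [] if none)
def pvF : List Char → List Char
  | [] => []
  | c :: cs => if '/' ∈ cs then c :: pvF cs else []

-- A's loop step on one character of the reversed string
def pvStep (st : List Char × Bool) (c : Char) : List Char × Bool :=
  let st1 := if st.2 then (c :: st.1, st.2) else st
  if c = '/' then (st1.1, true) else st1

-- pure forward model of Chars.splitOn · ['/']
def pvP : List Char → List (List Char)
  | [] => [[]]
  | c :: cs => if c = '/' then [] :: pvP cs else (pvP cs).modifyHead (c :: ·)

theorem pvF_append_singleton (xs : List Char) (c : Char) :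
    pvF (xs ++ [c]) = if c = '/' then xs else pvF xs := by
  induction xs with
  | nil => simp [pvF]
  | cons x xs ih =>
    by_cases hc : c = '/'
    · subst hc
      simp at ih ⊢
      have hmem : ('/' : Char) ∈ xs ++ ['/'] := by simp
      simp [pvF, hmem, ih]
    · simp only [if_neg hc] at ih ⊢
      have hmem : (('/' : Char) ∈ xs ++ [c]) ↔ ('/' : Char) ∈ xs := by
        simp [Ne.symm hc]
      by_cases hm : ('/' : Char) ∈ xs
      · simp [pvF, hmem, hm, ih]
      · simp [pvF, hmem, hm]

-- A's loop with read = true prepends everything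
theorem pvStep_true (rs : List Char) (dir : List Char) :
    rs.foldl pvStep (dir, true) = (rs.reverse ++ dir, true) := by
  induction rs generalizing dir with
  | nil => simp
  | cons c rs ih =>
    by_cases hc : c = '/' <;> simp [pvStep, hc, ih]

-- A's loop from read = false: drop until (and including) the first '/', then prepend the rest
theorem pvStep_false (rs : List Char) (dir : List Char) :
    (rs.foldl pvStep (dir, false)).1 = pvF rs.reverse ++ dir := by
  induction rs generalizing dir with
  | nil => simp [pvF]
  | cons c rs ih =>
    by_cases hc : c = '/'
    · simp [pvStep, hc, pvStep_true, pvF_append_singleton]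
    · simp [pvStep, hc, ih, pvF_append_singleton]

theorem pvP_ne_nil (cs : List Char) : pvP cs ≠ [] := by
  induction cs with
  | nil => simp [pvP]
  | cons c cs ih =>
    by_cases hc : c = '/'
    · simp [pvP, hc]
    · rcases h' : pvP cs with _ | ⟨p, ps⟩
      · exact absurd h' ih
      · simp [pvP, hc, h', List.modifyHead]

theorem pvP_length (cs : List Char) : 1 < (pvP cs).length ↔ '/' ∈ cs := by
  induction cs with
  | nil => simp [pvP]
  | cons c cs ih =>
    by_cases hc : c = '/'
    · have := List.length_pos_iff.mpr (pvP_ne_nil cs)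
      simp [pvP, hc]; omega
    · simp [pvP, hc, List.length_modifyHead, ih, Ne.symm hc]

theorem pvGo_eq (fuel : Nat) (l cur : List Char) (acc : List (List Char)) (h : l.length ≤ fuel) :
    PySem.Chars.splitOn.go ['/'] fuel l cur acc
      = acc.reverse ++ (pvP l).modifyHead (cur.reverse ++ ·) := by
  induction fuel generalizing l cur acc with
  | zero =>
    have : l = [] := by cases l <;> simp_all
    subst this
    rw [PySem.Chars.splitOn.go.eq_def]
    simp [pvP]
  | succ fuel ih =>
    cases l with
    | nil => rw [PySem.Chars.splitOn.go.eq_def]; simp [pvP]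
    | cons c rest =>
      rw [PySem.Chars.splitOn.go.eq_def]
      simp only [List.isPrefixOf, Bool.and_true]
      by_cases hc : c = '/'
      · simp only [hc, beq_self_eq_true, if_pos, List.length_cons, List.drop_succ_cons,
          List.length_nil, List.drop_zero]
        rw [ih rest [] (cur.reverse :: acc) (by simpa using Nat.le_of_succ_le_succ h)]
        rcases h' : pvP rest with _ | ⟨p, ps⟩
        · exact absurd h' (pvP_ne_nil rest)
        · simp [pvP, h', List.modifyHead]
      · have : (('/' : Char) == c) = false := by simp [Ne.symm hc]
        simp only [this, Bool.false_eq_true, if_false]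
        rw [ih rest (c :: cur) acc (by simpa using Nat.le_of_succ_le_succ h)]
        rcases h' : pvP rest with _ | ⟨p, ps⟩
        · exact absurd h' (pvP_ne_nil rest)
        · simp [pvP, hc, h', List.modifyHead]

theorem pvSplitOn_eq (cs : List Char) : PySem.Chars.splitOn cs ['/'] = pvP cs := by
  unfold PySem.Chars.splitOn
  rw [pvGo_eq cs.length.succ cs [] [] (Nat.le_succ _)]
  rcases h : pvP cs with _ | ⟨p, ps⟩
  · exact absurd h (pvP_ne_nil cs)
  · simp [List.modifyHead]

theorem pvJoin_cons (c : Char) (p : List Char) (rest : List (List Char)) :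
    PySem.Chars.join ['/'] ((c :: p) :: rest) = c :: PySem.Chars.join ['/'] (p :: rest) := by
  cases rest <;> simp [PySem.Chars.join, List.intercalate]

theorem pvJoin_nil_cons (p : List Char) (rest : List (List Char)) :
    PySem.Chars.join ['/'] ([] :: p :: rest) = '/' :: PySem.Chars.join ['/'] (p :: rest) := by
  simp [PySem.Chars.join, List.intercalate, List.intersperse]

theorem pvB_eq_F (cs : List Char) :
    PySem.Chars.join ['/'] ((pvP cs).dropLast) = pvF cs := by
  induction cs with
  | nil => simp [pvP, pvF, PySem.Chars.join, List.intercalate]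
  | cons c cs ih =>
    rcases h : pvP cs with _ | ⟨p, ps⟩
    · exact absurd h (pvP_ne_nil cs)
    · have hmem : '/' ∈ cs ↔ ps ≠ [] := by
        rw [← pvP_length cs, h]; cases ps <;> simp
      by_cases hc : c = '/'
      · subst hc
        have hP : pvP ('/' :: cs) = [] :: pvP cs := by simp [pvP]
        rcases hps : ps with _ | ⟨q, qs⟩
        · have hno : ¬ '/' ∈ cs := by simp [hmem, hps]
          simp [pvF, hno, hP, h, hps, PySem.Chars.join, List.intercalate]
        · have hin : '/' ∈ cs := by simp [hmem, hps]
          rw [pvF, if_pos hin, ← ih, hP, h, hps]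
          simp only [List.dropLast_cons₂, pvJoin_nil_cons]
      · have hP : pvP (c :: cs) = (c :: p) :: ps := by
          simp [pvP, hc, h, List.modifyHead]
        rcases hps : ps with _ | ⟨q, qs⟩
        · have hno : ¬ '/' ∈ cs := by simp [hmem, hps]
          simp [pvF, hno, hP, hps, PySem.Chars.join, List.intercalate]
        · have hin : '/' ∈ cs := by simp [hmem, hps]
          rw [pvF, if_pos hin, ← ih, hP, h, hps]
          simp only [List.dropLast_cons₂, pvJoin_cons]

-- ===== VERDICT (by name: the statement is the Claim_ definition above) =====
theorem get_dir_spec : Claim_equal_get_dir := by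
  intro s _
  show get_dir s = get_dir_alt s
  unfold get_dir get_dir_alt
  simp only [PySem.List.slice_to_neg_one, pvSplitOn_eq, pvB_eq_F]
  congr 1
  set cs := s.toList with hcs
  have hlen : PySem.Str.len s = (cs.length : Int) := by
    simp [PySem.Str.len, hcs]
  rw [hlen]
  have hswap : (PySem.List.pyRange 0 (cs.length : Int) 1).foldl
      (fun (st : List Char × Bool) i =>
        let st1 := if st.2 then ((PySem.List.pyGetD cs (-1 - i) ' ') :: st.1, st.2) else st
        if PySem.List.pyGetD cs (-1 - i) ' ' = '/' then (st1.1, true) else st1)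
      ([], false)
    = (PySem.List.pyRange 0 ((cs.reverse).length : Int) 1).foldl
      (fun (st : List Char × Bool) i => pvStep st (PySem.List.pyGetD cs.reverse i ' '))
      ([], false) := by
    rw [List.length_reverse]
    apply PySem.List.foldl_congr_mem
    intro acc i hi
    rw [PySem.List.mem_pyRange_one] at hi
    have h1 : PySem.List.pyGetD cs (-1 - i) ' ' = PySem.List.pyGetD cs.reverse i ' ' := by
      have hi1 : 0 ≤ i := hi.1
      have hi2 : i < (cs.length : Int) := by simpa using hi.2
      have e1 : (-1 - i) = -(((i + 1).toNat : Int)) := by omega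
      rw [e1, PySem.List.pyGetD_neg_natCast cs (i + 1).toNat ' ' (by omega) (by omega),
          PySem.List.pyGetD_eq_getElem cs.reverse ' ' hi1 (by simpa using hi2),
          List.getElem_reverse]
      congr 1
      omega
    rw [h1]
    rfl
  rw [hswap, PySem.List.foldl_pyRange_zero_pyGetD' cs.reverse ' ' pvStep ([], false)]
  rw [pvStep_false cs.reverse []]
  simp
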